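-- pv_equiv track=rewrite | github.com/littlehifive/ai-un-report | src/discover_enhanced.py | _extract_file_urls
-- ===== SOURCE A (Python) =====
-- from typing import List, Dict, Any, Optional
--
-- def _extract_file_urls(downloads: Dict[str, str], record_id: str) -> List[str]:
--     """Extract and prioritize file URLs."""
--     urls = []
--
--     # Prioritize English PDFs
--     for desc, url in downloads.items():
--         if "English" in desc or "-EN." in url.upper():
--             urls.insert(0, url)
--         elif ".pdf" in url.lower():
--             urls.append(url)
--
--     if not urls:
--         urls.append(f"https://digitallibrary.un.org/record/{record_id}")
--
--     return urls
-- ===== SOURCE B (Python) =====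
-- def _extract_file_urls(downloads, record_id):
--     """Extract and prioritize file URLs (two filtered passes instead of one interleaved loop)."""
--     def is_english(desc, url):
--         return "English" in desc or "-EN." in url.upper()
--
--     english = [url for desc, url in downloads.items() if is_english(desc, url)]
--     pdfs = [url for desc, url in downloads.items()
--             if not is_english(desc, url) and ".pdf" in url.lower()]
--     urls = english[::-1] + pdfs
--     return urls or [f"https://digitallibrary.un.org/record/{record_id}"]
-- ===== Notes on version B (the rewrite author's own statement) =====
-- stated objective: simpler
-- what changed: Replaces the single interleaved loop with insert(0)/append bookkeeping by two declarative filtered passes (English urls, then non-English PDFs) combined as english[::-1] + pdfs.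
import Mathlib
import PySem

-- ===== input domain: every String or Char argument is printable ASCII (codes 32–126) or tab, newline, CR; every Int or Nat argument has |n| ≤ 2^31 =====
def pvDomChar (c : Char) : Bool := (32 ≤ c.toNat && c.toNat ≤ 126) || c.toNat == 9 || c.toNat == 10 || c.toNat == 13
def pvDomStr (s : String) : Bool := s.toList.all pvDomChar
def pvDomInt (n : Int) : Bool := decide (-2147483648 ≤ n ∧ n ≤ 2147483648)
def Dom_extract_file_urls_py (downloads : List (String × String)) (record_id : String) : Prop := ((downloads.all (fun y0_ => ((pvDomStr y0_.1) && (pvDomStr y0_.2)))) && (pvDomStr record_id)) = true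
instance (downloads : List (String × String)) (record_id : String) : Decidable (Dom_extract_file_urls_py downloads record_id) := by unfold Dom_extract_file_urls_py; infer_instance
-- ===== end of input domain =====

-- B replaces A's single interleaved loop (insert(0)/append) by two filtered passes combined as english[::-1] + pdfs; same return value.
-- ===== PORT A =====
def extract_file_urls_py (downloads : List (String × String)) (record_id : String) : List String :=
  -- for desc, url in downloads.items(): insert(0) / append / skip
  let urls := downloads.foldl (fun urls p =>
    if PySem.Str.isIn "English" p.1 || PySem.Str.isIn "-EN." (PySem.Str.upper p.2) then
      p.2 :: urls
    else if PySem.Str.isIn ".pdf" (PySem.Str.lower p.2) then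
      urls ++ [p.2]
    else urls) []
  if urls.isEmpty then ["https://digitallibrary.un.org/record/" ++ record_id] else urls

-- ===== PORT B =====
-- helper for B: is_english(desc, url)
def pvIsEnglish (desc url : String) : Bool :=
  PySem.Str.isIn "English" desc || PySem.Str.isIn "-EN." (PySem.Str.upper url)

def extract_file_urls_py_alt (downloads : List (String × String)) (record_id : String) : List String :=
  let english := (downloads.filter (fun p => pvIsEnglish p.1 p.2)).map Prod.snd
  let pdfs := (downloads.filter (fun p =>
      !pvIsEnglish p.1 p.2 && PySem.Str.isIn ".pdf" (PySem.Str.lower p.2))).map Prod.snd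
  let urls := english.reverse ++ pdfs
  if urls.isEmpty then ["https://digitallibrary.un.org/record/" ++ record_id] else urls

-- ===== PRECONDITION & SPEC =====
def Spec_extract_file_urls_py (downloads : List (String × String)) (record_id : String) (out : List String) : Prop := out = extract_file_urls_py_alt downloads record_id
instance (downloads : List (String × String)) (record_id : String) (out : List String) : Decidable (Spec_extract_file_urls_py downloads record_id out) := by unfold Spec_extract_file_urls_py; infer_instance

-- ===== CLAIM (what is proved, stated in full; the proofs are below) =====
def Claim_equal_extract_file_urls_py : Prop := ∀ (downloads : List (String × String)) (record_id : String), Dom_extract_file_urls_py downloads record_id → Spec_extract_file_urls_py downloads record_id (extract_file_urls_py downloads record_id)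

-- ===== LEMMAS AND PROOFS =====
-- Loop invariant for A's fold: front-insertions accumulate reversed, appends in order.
theorem pv_fold_eq (l : List (String × String)) (acc : List String) :
    l.foldl (fun urls p =>
      if pvIsEnglish p.1 p.2 then p.2 :: urls
      else if PySem.Str.isIn ".pdf" (PySem.Str.lower p.2) then urls ++ [p.2]
      else urls) acc
    = ((l.filter (fun p => pvIsEnglish p.1 p.2)).map Prod.snd).reverse ++ acc ++
      ((l.filter (fun p =>
        !pvIsEnglish p.1 p.2 && PySem.Str.isIn ".pdf" (PySem.Str.lower p.2))).map Prod.snd) := by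
  induction l generalizing acc with
  | nil => simp
  | cons h t ih =>
    simp only [List.foldl_cons, List.filter_cons]
    by_cases he : pvIsEnglish h.1 h.2 = true
    · simp only [he, Bool.not_true, Bool.false_and, if_true, if_false, Bool.false_eq_true,
        List.map_cons, List.reverse_cons, ih]
      simp [List.append_assoc]
    · simp only [Bool.not_eq_true] at he
      by_cases hp : PySem.Str.isIn ".pdf" (PySem.Str.lower h.2) = true
      · simp only [he, hp, Bool.not_false, Bool.true_and, if_true, if_false, Bool.false_eq_true,
          List.map_cons, ih]
        simp [List.append_assoc]
      · simp only [Bool.not_eq_true] at hp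
        simp only [he, hp, Bool.not_false, Bool.true_and, if_false, Bool.false_eq_true, ih]

-- ===== VERDICT (by name: the statement is the Claim_ definition above) =====
theorem extract_file_urls_py_spec : Claim_equal_extract_file_urls_py := by
  intro downloads record_id _
  unfold Spec_extract_file_urls_py
  show (let urls := downloads.foldl (fun urls p =>
      if pvIsEnglish p.1 p.2 then p.2 :: urls
      else if PySem.Str.isIn ".pdf" (PySem.Str.lower p.2) then urls ++ [p.2]
      else urls) [];
    if urls.isEmpty then ["https://digitallibrary.un.org/record/" ++ record_id] else urls)
    = extract_file_urls_py_alt downloads record_id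
  rw [show (downloads.foldl (fun urls p =>
      if pvIsEnglish p.1 p.2 then p.2 :: urls
      else if PySem.Str.isIn ".pdf" (PySem.Str.lower p.2) then urls ++ [p.2]
      else urls) []) = _ from pv_fold_eq downloads []]
  simp only [List.append_nil]
  rfl
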